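-- pv_equiv track=rewrite | github.com/avinash-rath/DSAlgo | special_workbook.py | lisas_workbook
-- ===== SOURCE A (Python) =====
-- def lisas_workbook(n,k,a):
--
--
--     num_special=0
--     cur_page=1
--
--     for item in a:
--
--         num_probs_in_chapter= item
--         num_full_pages, leftover_probs = divmod(num_probs_in_chapter, k)
--
--         total_pages = num_full_pages + ( 1 if leftover_probs else 0 )
--         problems_in_chapter=iter(range(1, item+1))
--
--         for _ in range(total_pages):
--             probs_on_page = [next(problems_in_chapter, None) for _ in range(k)]
--             if cur_page in probs_on_page:
--                 num_special+=1
--             cur_page+=1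
--     return num_special
-- ===== SOURCE B (Python) =====
-- def lisas_workbook(n, k, a):
--     # Per chapter, compute the special-page count arithmetically: for k == 1 a
--     # closed form, otherwise check the (at most two) candidate pages directly.
--     special = 0
--     base = 1  # global number of the chapter's first page
--     for item in a:
--         pages = item // k + (1 if item % k else 0)
--         if pages < 0:
--             pages = 0
--         if k >= 1 and pages > 0:
--             if k == 1:
--                 if base == 1:
--                     special += pages
--             else:
--                 q = (base - 1) // (k - 1)
--                 for p in (q, q + 1):
--                     if 1 <= p <= pages and (p - 1) * k < base + p - 1 <= min(p * k, item):
--                         special += 1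
--         base += pages
--     return special
-- ===== Notes on version B (the rewrite author's own statement) =====
-- stated objective: faster
-- what changed: A simulates every page and materialises each page's problem list to test membership; B never enumerates problems or pages: per chapter it keeps the running base page number and computes the special-page count arithmetically (a closed form for k=1, otherwise checking the at most two candidate pages pinned down by the containment inequalities).
import Mathlib
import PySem

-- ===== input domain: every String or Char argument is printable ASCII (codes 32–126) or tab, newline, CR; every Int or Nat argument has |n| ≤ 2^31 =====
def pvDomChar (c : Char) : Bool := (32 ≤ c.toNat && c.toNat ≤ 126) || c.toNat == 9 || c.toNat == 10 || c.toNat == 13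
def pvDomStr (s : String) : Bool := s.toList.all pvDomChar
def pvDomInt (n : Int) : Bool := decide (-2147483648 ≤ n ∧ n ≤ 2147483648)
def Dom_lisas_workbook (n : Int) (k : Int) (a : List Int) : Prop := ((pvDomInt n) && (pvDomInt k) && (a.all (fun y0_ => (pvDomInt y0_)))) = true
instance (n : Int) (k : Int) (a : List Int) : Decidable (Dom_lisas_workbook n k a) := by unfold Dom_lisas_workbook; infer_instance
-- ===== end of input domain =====

-- B replaces A's per-page scan over every problem by per-chapter arithmetic
-- (a closed form for k = 1, otherwise at most two candidate pages); equivalence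
-- of the return values is proved for every k ≠ 0 (k = 0 makes A raise).

-- ===== PORT A =====
-- inner 'for _ in range(total_pages)' loop: state st = (num_special, cur_page).
-- The lazy iterator iter(range(1, item+1)) is represented by its current
-- position lo (the next value it will yield); each page is the literal list
-- comprehension [next(it, None) for _ in range(k)], and the k calls of next
-- advance the position by k
def pvChapterA (k item : Int) : Nat → Int → Int × Int → Int × Int
  | 0, _, st => st
  | m + 1, lo, st =>
      let page : List (Option Int) :=
        (List.range k.toNat).map (fun (i : Nat) => if lo + (i : Int) ≤ item then some (lo + (i : Int)) else none)
      let sp := if some st.2 ∈ page then st.1 + 1 else st.1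
      pvChapterA k item m (lo + (k.toNat : Int)) (sp, st.2 + 1)

-- body of A's outer 'for item in a' loop
def pvStepA (k : Int) (st : Int × Int) (item : Int) : Int × Int :=
  let numFullPages := PySem.Int.floordiv item k
  let leftoverProbs := PySem.Int.mod item k
  let totalPages := numFullPages + (if leftoverProbs ≠ 0 then 1 else 0)
  pvChapterA k item totalPages.toNat 1 st

def lisas_workbook (n : Int) (k : Int) (a : List Int) : Int :=
  (a.foldl (pvStepA k) (0, 1)).1

-- ===== PORT B =====
-- candidate-page check: is page p of the current chapter special?
def pvCntB (k base item pages p : Int) : Int :=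
  if 1 ≤ p ∧ p ≤ pages ∧ (p - 1) * k < base + p - 1 ∧ base + p - 1 ≤ min (p * k) item then 1 else 0

-- body of B's 'for item in a' loop: st = (special, base)
def pvStepB (k : Int) (st : Int × Int) (item : Int) : Int × Int :=
  let special := st.1
  let base := st.2
  let pages0 := PySem.Int.floordiv item k + (if PySem.Int.mod item k ≠ 0 then 1 else 0)
  let pages := if pages0 < 0 then 0 else pages0
  let special :=
    if 1 ≤ k ∧ 0 < pages then
      if k = 1 then (if base = 1 then special + pages else special)
      else
        let q := PySem.Int.floordiv (base - 1) (k - 1)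
        special + pvCntB k base item pages q + pvCntB k base item pages (q + 1)
    else special
  (special, base + pages)

def lisas_workbook_alt (n : Int) (k : Int) (a : List Int) : Int :=
  (a.foldl (pvStepB k) (0, 1)).1

-- ===== PRECONDITION & SPEC =====
-- A raises ZeroDivisionError (divmod(item, k)) iff k = 0 and a is non-empty,
-- and raises on no other input; B divides by k too, so exactly those inputs
-- are excluded.
def Pre_lisas_workbook (n : Int) (k : Int) (a : List Int) : Prop := k ≠ 0 ∨ a = []
instance (n : Int) (k : Int) (a : List Int) : Decidable (Pre_lisas_workbook n k a) := by unfold Pre_lisas_workbook; infer_instance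

def pvWitness_lisas_workbook : Int × Int × List Int := (2, 2, [4, 2])

def Spec_lisas_workbook (n : Int) (k : Int) (a : List Int) (out : Int) : Prop := out = lisas_workbook_alt n k a
instance (n : Int) (k : Int) (a : List Int) (out : Int) : Decidable (Spec_lisas_workbook n k a out) := by unfold Spec_lisas_workbook; infer_instance

-- ===== CLAIM (what is proved, stated in full; the proofs are below) =====
def Claim_equal_lisas_workbook : Prop := ∀ (n : Int) (k : Int) (a : List Int), Dom_lisas_workbook n k a → Pre_lisas_workbook n k a → Spec_lisas_workbook n k a (lisas_workbook n k a)

-- ===== LEMMAS AND PROOFS =====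

-- number of special pages among the m pages starting at current page number c,
-- the first problem of the chapter still unread being lo
def pvCountRec (k item : Int) : Int → Int → Nat → Int
  | _, _, 0 => 0
  | c, lo, m + 1 =>
      (if lo ≤ c ∧ c < lo + k ∧ c ≤ item then 1 else 0) + pvCountRec k item (c + 1) (lo + k) m

-- k ≤ 0: every built page is the empty list, the inner loop only advances cur_page
lemma pvChapterA_nonpos (k item : Int) (hk : k ≤ 0) :
    ∀ (m : Nat) (lo sp c : Int),
      pvChapterA k item m lo (sp, c) = (sp, c + m) := by
  intro m
  induction m with
  | zero => intro lo sp c; simp [pvChapterA]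
  | succ m ih =>
      intro lo sp c
      have hz : k.toNat = 0 := by omega
      simp only [pvChapterA, hz, List.range_zero, List.map_nil, List.not_mem_nil]
      rw [if_neg (by simp), ih]
      refine Prod.ext rfl ?_
      push_cast; omega

-- membership of cur_page in the page built from the next k values of the iterator
lemma pvPage_mem (k : Int) (hk : 1 ≤ k) (item lo c : Int) :
    (some c ∈ (List.range k.toNat).map
        (fun (i : Nat) => if lo + (i : Int) ≤ item then some (lo + (i : Int)) else none)) ↔
      (lo ≤ c ∧ c < lo + k ∧ c ≤ item) := by
  rw [List.mem_map]
  constructor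
  · rintro ⟨i, hi', hget⟩
    rw [List.mem_range] at hi'
    by_cases hle : lo + (i : Int) ≤ item
    · rw [if_pos hle, Option.some_inj] at hget
      have hik : (i : Int) < k := by omega
      refine ⟨by omega, by omega, by omega⟩
    · rw [if_neg hle] at hget
      exact absurd hget (by simp)
  · rintro ⟨h1, h2, h3⟩
    refine ⟨(c - lo).toNat, ?_, ?_⟩
    · rw [List.mem_range]; omega
    · rw [if_pos (by omega), Option.some_inj]; omega

-- the inner loop of A computes pvCountRec
lemma pvChapterA_count (k item : Int) (hk : 1 ≤ k) :
    ∀ (m : Nat) (lo sp c : Int),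
      pvChapterA k item m lo (sp, c) =
        (sp + pvCountRec k item c lo m, c + m) := by
  intro m
  induction m with
  | zero => intro lo sp c; simp [pvChapterA, pvCountRec]
  | succ m ih =>
      intro lo sp c
      simp only [pvChapterA, pvCountRec]
      rw [ih]
      have hmem := pvPage_mem k hk item lo c
      have htk : (lo + (k.toNat : Int)) = lo + k := by omega
      rw [htk]
      by_cases hc : lo ≤ c ∧ c < lo + k ∧ c ≤ item
      · rw [if_pos (hmem.mpr (by omega)), if_pos hc]
        refine Prod.ext (by ring_nf) ?_
        push_cast; ring_nf
      · rw [if_neg (fun h => hc (by have := hmem.mp h; omega)), if_neg hc]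
        refine Prod.ext (by ring_nf) ?_
        push_cast; ring_nf

-- closed form of the count for k = 1
lemma pvCountRec_one (item : Int) : ∀ (m : Nat) (c lo : Int),
    pvCountRec 1 item c lo m = if c = lo then max 0 (min (m : Int) (item - c + 1)) else 0 := by
  intro m
  induction m with
  | zero => intro c lo; simp [pvCountRec]
  | succ m ih =>
      intro c lo
      rw [pvCountRec, ih]
      by_cases hc : c = lo
      · subst hc
        rw [if_pos rfl, if_pos rfl]
        by_cases h2 : c ≤ item
        · rw [if_pos (by omega)]; push_cast; omega
        · rw [if_neg (by omega)]; push_cast; omega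
      · rw [if_neg (by omega), if_neg (by omega), if_neg hc]
        simp

-- the count as a sum over 0-based page indices j (page j holds problems lo+jk..lo+jk+k-1)
lemma pvCountRec_eq_sum (k item : Int) : ∀ (m : Nat) (c lo : Int),
    pvCountRec k item c lo m =
      ∑ j ∈ Finset.range m,
        (if lo + (j : Int) * k ≤ c + j ∧ c + (j : Int) < lo + j * k + k ∧ c + (j : Int) ≤ item then 1 else 0 : Int) := by
  intro m
  induction m with
  | zero => intro c lo; simp [pvCountRec]
  | succ m ih =>
      intro c lo
      rw [Finset.sum_range_succ', pvCountRec, ih, add_comm]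
      congr 1
      · apply Finset.sum_congr rfl
        intro j _
        apply if_congr _ rfl rfl
        have e : ((j : Int) + 1) * k = j * k + k := by ring
        constructor <;> rintro ⟨h1, h2, h3⟩ <;> push_cast <;> push_cast at h1 h2 h3 <;>
          exact ⟨by linarith, by linarith, by linarith⟩
      · apply if_congr _ rfl rfl
        push_cast
        constructor <;> rintro ⟨h1, h2, h3⟩ <;> exact ⟨by linarith, by linarith, by linarith⟩

-- a sum supported on at most the two points a, b
lemma pvSum_two (m : Nat) (f : Nat → Int) (a b : Int) (hab : a ≠ b)
    (h : ∀ j : Nat, j < m → f j ≠ 0 → (j : Int) = a ∨ (j : Int) = b) :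
    ∑ j ∈ Finset.range m, f j =
      (if 0 ≤ a ∧ a < m then f a.toNat else 0) + (if 0 ≤ b ∧ b < m then f b.toNat else 0) := by
  have hpt : ∀ j ∈ Finset.range m,
      f j = (if j = a.toNat ∧ 0 ≤ a then f j else 0) + (if j = b.toNat ∧ 0 ≤ b then f j else 0) := by
    intro j hj
    rw [Finset.mem_range] at hj
    by_cases hz : f j = 0
    · rw [hz]; split_ifs <;> simp [hz]
    · rcases h j hj hz with hja | hjb
      · rw [if_pos (by omega), if_neg (by omega)]; omega
      · rw [if_neg (by omega), if_pos (by omega)]; omega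
  rw [Finset.sum_congr rfl hpt, Finset.sum_add_distrib]
  congr 1
  · by_cases ha : 0 ≤ a ∧ a < m
    · rw [if_pos ha]
      have hcongr : ∀ j ∈ Finset.range m, (if j = a.toNat ∧ 0 ≤ a then f j else 0) = (if j = a.toNat then f j else 0) := by
        intro j _; apply if_congr _ rfl rfl; constructor <;> intro hh <;> [exact hh.1; exact ⟨hh, ha.1⟩]
      rw [Finset.sum_congr rfl hcongr, Finset.sum_ite_eq' (Finset.range m) a.toNat f,
        if_pos (Finset.mem_range.mpr (by omega))]
    · rw [if_neg ha]
      apply Finset.sum_eq_zero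
      intro j hj
      rw [Finset.mem_range] at hj
      rw [if_neg (by omega)]
  · by_cases hb : 0 ≤ b ∧ b < m
    · rw [if_pos hb]
      have hcongr : ∀ j ∈ Finset.range m, (if j = b.toNat ∧ 0 ≤ b then f j else 0) = (if j = b.toNat then f j else 0) := by
        intro j _; apply if_congr _ rfl rfl; constructor <;> intro hh <;> [exact hh.1; exact ⟨hh, hb.1⟩]
      rw [Finset.sum_congr rfl hcongr, Finset.sum_ite_eq' (Finset.range m) b.toNat f,
        if_pos (Finset.mem_range.mpr (by omega))]
    · rw [if_neg hb]
      apply Finset.sum_eq_zero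
      intro j hj
      rw [Finset.mem_range] at hj
      rw [if_neg (by omega)]

-- for k ≥ 2 a special page index j can only be (c-lo)/(k-1) - 1 or (c-lo)/(k-1)
lemma pvDichotomy (k c lo j : Int) (hk : 2 ≤ k)
    (h1 : lo + j * k ≤ c + j) (h2 : c + j < lo + j * k + k) :
    j = (c - lo) / (k - 1) - 1 ∨ j = (c - lo) / (k - 1) := by
  have hb : (0 : Int) < k - 1 := by omega
  have hu : j ≤ (c - lo) / (k - 1) := by
    rw [Int.le_ediv_iff_mul_le hb]; nlinarith
  have hl : (c - lo) / (k - 1) ≤ j + 1 := by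
    have hle : c - lo ≤ (j + 1) * (k - 1) := by nlinarith
    have := Int.ediv_le_ediv hb hle
    rwa [Int.mul_ediv_cancel _ (by omega)] at this
  omega

-- the two chapter step functions agree for k ≠ 0
lemma pvStep_eq (k : Int) (hk : k ≠ 0) (st : Int × Int) (item : Int) :
    pvStepA k st item = pvStepB k st item := by
  obtain ⟨sp, c⟩ := st
  simp only [pvStepA, pvStepB]
  set fd := PySem.Int.floordiv item k with hfd
  set md := PySem.Int.mod item k with hmd
  set t := fd + (if md ≠ 0 then 1 else 0) with ht
  have hmul := PySem.Int.floordiv_mul_add_mod item k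
  rcases lt_trichotomy k 0 with hneg | hz | hpos
  · -- k ≤ -1 : pages are empty lists
    rw [pvChapterA_nonpos k item (by omega)]
    rw [if_neg (by omega)]
    refine Prod.ext rfl ?_
    simp only
    omega
  · omega
  · -- k ≥ 1
    rw [pvChapterA_count k item (by omega)]
    have hpages : ((t.toNat : Int)) = (if t < 0 then 0 else t) := by omega
    refine Prod.ext ?_ (by simp only; omega)
    simp only
    by_cases hpos' : (0 : Int) < (if t < 0 then 0 else t)
    · have htpos : 0 < t := by omega
      have hm : ((t.toNat : Int)) = t := by omega
      rw [if_pos ⟨by omega, hpos'⟩]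
      by_cases hk1 : k = 1
      · -- closed form for k = 1
        subst hk1
        have hmd0 : md = 0 := by
          have h1 := PySem.Int.mod_nonneg item (b := 1) (by omega)
          have h2 := PySem.Int.mod_lt item (b := 1) (by omega)
          omega
        have hfd1 : fd = item := by rw [hmd] at hmd0; rw [hfd]; omega
        rw [if_pos rfl, pvCountRec_one]
        by_cases hc : c = 1
        · rw [if_pos hc, if_pos hc]
          omega
        · rw [if_neg hc, if_neg hc]
          omega
      · -- k ≥ 2: two candidate pages
        rw [if_neg hk1]
        have hk2 : (2 : Int) ≤ k := by omega
        rw [pvCountRec_eq_sum]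
        set f : Nat → Int := fun j =>
          (if 1 + (j : Int) * k ≤ c + j ∧ c + (j : Int) < 1 + j * k + k ∧ c + (j : Int) ≤ item then 1 else 0 : Int) with hf
        have hq : PySem.Int.floordiv (c - 1) (k - 1) = (c - 1) / (k - 1) :=
          PySem.Int.floordiv_eq_ediv_of_pos (by omega)
        set j0 := (c - 1) / (k - 1) with hj0
        have hsum := pvSum_two t.toNat f (j0 - 1) j0 (by omega) ?_
        · rw [hsum]
          have hG : ∀ x : Int, (if 0 ≤ x ∧ x < (t.toNat : Int) then f x.toNat else 0) =
              pvCntB k c item (if t < 0 then 0 else t) (x + 1) := by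
            intro x
            by_cases hx : 0 ≤ x ∧ x < (t.toNat : Int)
            · rw [if_pos hx]
              have hxx : ((x.toNat : Int)) = x := by omega
              rw [hf]
              simp only [hxx]
              rw [pvCntB]
              apply if_congr _ rfl rfl
              have e : (x + 1) * k = x * k + k := by ring
              constructor
              · rintro ⟨h1, h2, h3⟩
                refine ⟨by omega, by omega, by linarith, ?_⟩
                rw [le_min_iff]
                exact ⟨by linarith, by linarith⟩
              · rintro ⟨h1, h2, h3, h4⟩
                rw [le_min_iff] at h4
                exact ⟨by linarith, by linarith [h4.1], by linarith [h4.2]⟩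
            · rw [if_neg hx, pvCntB, if_neg (by
                rintro ⟨h1, h2, _, _⟩
                exact hx ⟨by omega, by omega⟩)]
          rw [hG (j0 - 1), hG j0, hq]
          have e1 : j0 - 1 + 1 = j0 := by ring
          rw [e1]
          ring
        · -- only the two candidate indices can be special
          intro j hj hnz
          have hcond : 1 + (j : Int) * k ≤ c + j ∧ c + (j : Int) < 1 + j * k + k ∧ c + (j : Int) ≤ item := by
            by_contra hcon
            rw [hf] at hnz
            exact hnz (by simp only []; rw [if_neg hcon])
          have := pvDichotomy k c 1 j hk2 hcond.1 hcond.2.1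
          simpa using this
    · -- no pages in this chapter
      have hm0 : t.toNat = 0 := by omega
      rw [if_neg (fun h => hpos' h.2), hm0]
      simp [pvCountRec]

lemma pvFold_eq (k : Int) (hk : k ≠ 0) :
    ∀ (a : List Int) (st : Int × Int), a.foldl (pvStepA k) st = a.foldl (pvStepB k) st := by
  intro a
  induction a with
  | nil => intro st; rfl
  | cons x xs ih => intro st; simp only [List.foldl_cons, pvStep_eq k hk]; exact ih _

-- ===== VERDICT (by name: the statement is the Claim_ definition above) =====
theorem lisas_workbook_spec : Claim_equal_lisas_workbook := by
  intro n k a _ hpre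
  rcases hpre with hk | hnil
  · unfold Spec_lisas_workbook lisas_workbook lisas_workbook_alt
    rw [pvFold_eq k hk]
  · subst hnil; rfl
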